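/- GENERATED by mk_final_copies.py from the proof of the farm's unit `imdct_step3_inner_r_loop.2` (farm:imdct_step3_inner_r_loop.2.1: Proof.lean) as the
   re-elaboration sweep compiled it — do not edit. -/
import Asan.CheckWalk
import Vorbis.Spec.Units.imdct_step3_inner_r_loop_2
open X86 X86.User Asan Vorbis Vorbis.Spec

set_option maxRecDepth 4000
set_option maxHeartbeats 4000000

namespace Vorbis.Spec.imdct_step3_inner_r_loop_2

/-- `movsxd r13, [k1 slot] ; shl r13, 2` for a non-negative `int` `k1`: the byte stride `4 k1` (stb_vorbis_fixed.c:2496). -/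
theorem sext_shl2 (k1 : Nat) (h : k1 < 2 ^ 31) :
    (Word.ofBV (BitVec.signExtend 64 (BitVec.ofNat 32 k1)) <<< 2).toNat = 4 * k1 := by
  have e1 : (BitVec.ofNat 32 k1).toNat = k1 := toNat_ofNat32 k1 (by omega)
  have e2 : (Word.ofBV (BitVec.signExtend 64 (BitVec.ofNat 32 k1))).toNat = k1 := by
    rw [toNat_sext32 _ (by omega), e1]
  have e3 : (2 : UInt64).toNat % 64 = 2 := by decide
  rw [UInt64.toNat_shiftLeft, e2, e3, Nat.shiftLeft_eq]
  omega

/-- **The exit assertion at `cut2`** (0x10592b, after the second `A += k1`, stb_vorbis_fixed.c:2505): from the entry assertion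
`AtBody` at `cut1` (state `v`) and what the walk says of the state `s` it reached — the registers, and the memory as 22 stores
over `v.mem` (return addresses of the check calls and float scratch in the own frame; `e0[-3 .. 0]`, `e2[-3 .. 0]`; the stored
floats `x…` and return addresses `r…` are opaque) — to `AtMid`: two quarters done, `r13 = 4 k1`. -/
theorem exit_assertion {Lay : Layout} (hLay : Lay.hi = 0x1000000) {u₀ : State} {others : List Obj} {frames : List (Nat × FrameLayout)} {len i0 koff k1 : Nat}
    {ue : State} {ret : Word} {t : Nat} {v s : State} {K4 : Word}
    {x1 x2 x3 x4 x5 x6 x7 x8 x9 x10 x11 x12 x13 x14 x15 : BitVec 32}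
    (hv : imdct_step3_inner_r_loop.AtBody u₀ others frames len i0 koff k1 ue ret t v)
    (hK4 : K4.toNat = 4 * k1)
    (w_rip : s.rip = Vorbis.L.imdct_step3_inner_r_loop.cut2)
    (w_rbx : s.reg .rbx = v.reg .rbx + K4 + K4)
    (w_r13 : s.reg .r13 = K4)
    (w_rsp : s.reg .rsp = ue.reg .rsp - 88)
    (w_kept : RegsKept [.rbx, .r14, .r13, .rsp, .rdi, .rax, .rcx, .rdx] v s)
    (w_mem : s.mem =
      (((((((((((((((((((((v.mem.writeLE (ue.reg .rsp - 96) 8 1070979).writeLE (ue.reg .rsp - 72) 4 x1.toNat).writeLE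
        (ue.reg .rsp - 76) 4 x2.toNat).writeLE (ue.reg .rsp - 96) 8 1071029).writeLE (ue.reg .rsp - 68) 4 x3.toNat).writeLE
        (v.reg .r12) 4 x4.toNat).writeLE (v.reg .r12 - 4) 4 x5.toNat).writeLE (ue.reg .rsp - 96) 8 1071111).writeLE
        (v.reg .rbp) 4 x6.toNat).writeLE (v.reg .rbp - 4) 4 x7.toNat).writeLE (ue.reg .rsp - 96) 8 1071188).writeLE
        (ue.reg .rsp - 76) 4 x8.toNat).writeLE (ue.reg .rsp - 96) 8 1071210).writeLE (ue.reg .rsp - 68) 4 x9.toNat).writeLE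
        (ue.reg .rsp - 72) 4 x10.toNat).writeLE (ue.reg .rsp - 96) 8 1071261).writeLE (ue.reg .rsp - 64) 4 x11.toNat).writeLE
        (v.reg .r12 - 8) 4 x12.toNat).writeLE (v.reg .r12 - 12) 4 x13.toNat).writeLE (ue.reg .rsp - 96) 8 1071345).writeLE
        (v.reg .rbp - 8) 4 x14.toNat).writeLE (v.reg .rbp - 12) 4 x15.toNat)
    (w_eq : Mem.EqOn Vorbis.L.textLo Vorbis.L.textHi u₀.mem s.mem)
    (hdf : s.flags .df = false)
    (hmx : s.mxcsr &&& 0x1F80 = 0x1F80) :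
    imdct_step3_inner_r_loop.AtMid u₀ others frames len i0 koff k1 ue ret t s := by
  obtain ⟨hrip, hloop, hlt⟩ := hv
  obtain ⟨hbody, hle, hcnt, he0, he2, hA, hk1slot⟩ := hloop
  obtain ⟨he, hpre, hcodeok, habi, hframe, hsame, hshadow⟩ := hbody
  obtain ⟨hrsp, sret, s15, s14, s13, s12, sbp, sbx⟩ := hframe
  have he0' := he
  v_entry he
  have hpre0 := hpre
  obtain ⟨hsh, hn31, hi0, hneg, hk1, hk31, hpair, hlive, hAlive⟩ := hpre
  -- where the sample buffer and the twiddle table are: below C00000H, off the own stack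
  have hhi := hpair.hi
  have hlo := hpair.lo
  have hwhere := hlive.where_ hsh.inv hsh.offText (by omega) (by omega)
  have hAl := hAlive (by omega)
  have hwhereA := hAl.where_ hsh.inv hsh.offText (by omega) (by omega)
  -- the two products of the `A` index as atoms (`Mdct.RLoop.A`: quarter `j ≤ 3` of iteration `t < m`)
  obtain ⟨P, hP⟩ : ∃ P, P = k1 * (4 * t) := ⟨_, rfl⟩
  obtain ⟨Q, hQ⟩ : ∃ Q, Q = k1 * (4 * quarter ue - 1) := ⟨_, rfl⟩
  have hPQ : P + 3 * k1 ≤ Q := by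
    have h : k1 * (4 * t + 3) ≤ k1 * (4 * quarter ue - 1) := Nat.mul_le_mul_left k1 (by omega)
    rw [Nat.mul_add] at h
    omega
  rw [Nat.add_zero, ← hP] at hA
  rw [← hQ] at hAl hwhereA
  simp only [X86.User.Spec.footprint, vspec] at hsame
  -- the part of the own frame the segment does not write: the `k1` slot, the six save slots, the return address
  have hkeep : Mem.EqOn ((ue.reg .rsp).toNat - 60) ((ue.reg .rsp).toNat + 8) v.mem s.mem := by
    u_memnorm
    u_eqon
  refine ⟨w_rip, ⟨⟨he0', hpre0, w_eq, ⟨hdf, hmx⟩, ⟨w_rsp, ?f_ret, ?f_r15, ?f_r14, ?f_r13, ?f_r12, ?f_rbp, ?f_rbx⟩,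
    ?f_same, ?f_shadow⟩, hle, ?f_cnt, ?f_e0, ?f_e2, ?f_A, ?f_k1slot⟩, hlt, ?f_stride⟩
  case f_ret =>
    rw [hkeep.readLE _ 8 (by u_omega) (by u_omega) (by u_omega)]
    exact sret
  case f_r15 =>
    rw [hkeep.readLE _ 8 (by u_omega) (by u_omega) (by u_omega)]
    exact s15
  case f_r14 =>
    rw [hkeep.readLE _ 8 (by u_omega) (by u_omega) (by u_omega)]
    exact s14
  case f_r13 =>
    rw [hkeep.readLE _ 8 (by u_omega) (by u_omega) (by u_omega)]
    exact s13
  case f_r12 =>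
    rw [hkeep.readLE _ 8 (by u_omega) (by u_omega) (by u_omega)]
    exact s12
  case f_rbp =>
    rw [hkeep.readLE _ 8 (by u_omega) (by u_omega) (by u_omega)]
    exact sbp
  case f_rbx =>
    rw [hkeep.readLE _ 8 (by u_omega) (by u_omega) (by u_omega)]
    exact sbx
  case f_same =>
    -- the stores: the own frame, and e0[-3 .. 0], e2[-3 .. 0] inside the two runs of the footprint
    -- (`vspec` unfolds the iteration count `quarter ue` in the windows: tie it to the atom of `hlt`, `hlo`)
    have hq := quarter_def ue
    simp only [X86.User.Spec.footprint, vspec]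
    u_same
  case f_shadow =>
    v_untouched
  case f_cnt =>
    rw [w_kept .r15 rfl]
    exact hcnt
  case f_e0 =>
    rw [w_kept .r12 rfl]
    exact he0
  case f_e2 =>
    rw [w_kept .rbp rfl]
    exact he2
  case f_A =>
    -- rbx = A + 4 k1 (4 t) + 4 k1 + 4 k1, nothing wraps: the table is below C00000H
    have e : k1 * (4 * t + 2) = P + 2 * k1 := by
      rw [hP, Nat.mul_add]
      omega
    rw [w_rbx, e]
    u_omega
  case f_k1slot =>
    rw [hkeep.readLE _ 4 (by u_omega) (by u_omega) (by u_omega)]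
    exact hk1slot
  case f_stride =>
    rw [w_r13]
    exact hK4

end Vorbis.Spec.imdct_step3_inner_r_loop_2

/-- Segment 2 of `imdct_step3_inner_r_loop` (`cut1` 0x10576f … `cut2` 0x10592b: quarters 0 and 1 of the loop body, C lines
2489–2505, 91 instructions, 12 `load4` checks, two `A += k1`): from `AtBody` to `AtMid`. Straight-line code. The walk STOPS at
the return of every check call (`ret1` … `ret12`) to `clear w_zmm`: a check call makes the walker track the vector registers,
and the tracked term doubles with every SSE instruction (NOTES.md). The `e` checks are closed with `LiveBytes.accSmall` on the
sample buffer (`PairDown`, `8 t + 3 < 8 m`), the `A` checks on the twiddle table (`k1 (4 t + 1) + 1 ≤ k1 (4 m − 1) + 1`); the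
stride `4 k1` (`movsxd ; shl` of the spilled `k1`) becomes the atom `K4` at `ret7`. -/
theorem Vorbis.Spec.Worked.imdct_step3_inner_r_loop_2_ok : Vorbis.Spec.imdct_step3_inner_r_loop_2.Statement := by
  intro Lay hLay μ hμ u₀ hcode hload4 others frames len i0 koff k1 ue ret t v hv
  -- 1. the entry assertion `AtBody` (kept whole as `hv0` for the exit lemma), opened field by field
  have hv0 := hv
  obtain ⟨hrip, hloop, hlt⟩ := hv
  obtain ⟨hbody, hle, hcnt, he0, he2, hA, hk1slot⟩ := hloop
  obtain ⟨he, hpre, hcodeok, habi, hframe, hsame, hshadow⟩ := hbody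
  obtain ⟨hrsp, sret, s15, s14, s13, s12, sbp, sbx⟩ := hframe
  have he0' := he
  v_entry he
  have hpre0 := hpre
  obtain ⟨hsh, hn31, hi0, hneg, hk1, hk31, hpair, hlive, hAlive⟩ := hpre
  -- 2. the present state under the walker's names: DF / MXCSR / SseOK, the code span, rip, rsp
  have hdf := habi.1
  have hmx := habi.2
  have hsse : SseOK v := sseOK_of_abiInv habi
  have w_eq : Mem.EqOn Vorbis.L.textLo Vorbis.L.textHi u₀.mem v.mem := hcodeok
  have w_rip := hrip
  have w_rsp := hrsp
  -- 3. where the sample buffer and the twiddle table are: below C00000H, off the own stack (for every side condition)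
  have hhi := hpair.hi
  have hlo := hpair.lo
  have hwhere := hlive.where_ hsh.inv hsh.offText (by omega) (by omega)
  have hAl := hAlive (by omega)
  have hwhereA := hAl.where_ hsh.inv hsh.offText (by omega) (by omega)
  -- the two products of the `A` index as atoms (`Mdct.RLoop.A`: quarter `j ≤ 3` of iteration `t < m`)
  obtain ⟨P, hP⟩ : ∃ P, P = k1 * (4 * t) := ⟨_, rfl⟩
  obtain ⟨Q, hQ⟩ : ∃ Q, Q = k1 * (4 * quarter ue - 1) := ⟨_, rfl⟩
  have hPQ : P + 3 * k1 ≤ Q := by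
    have h : k1 * (4 * t + 3) ≤ k1 * (4 * quarter ue - 1) := Nat.mul_le_mul_left k1 (by omega)
    rw [Nat.mul_add] at h
    omega
  rw [Nat.add_zero, ← hP] at hA
  rw [← hQ] at hAl hwhereA
  -- the carried footprint as a literal list of windows (for `v_untouched`)
  simp only [X86.User.Spec.footprint, vspec] at hsame
  -- 4. the walk, in 13 legs
  -- to the return of check 1 at 0x105772: e0[-0]  (r12), C line 2489
  u_walk hcode [hμ.vendor] until [Vorbis.L.imdct_step3_inner_r_loop.ret1] span [Vorbis.L.textLo, Vorbis.L.textHi] side (v_side)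
  case check_105772 =>
    have hun : ShadowUntouched ue.mem s_105772.mem := by v_untouched
    exact hlive.accSmall hsh.inv hun _ 4 (by decide) (by u_omega) (by u_omega)
  try clear w_zmm
  -- to the return of check 2 at 0x10577e: e2[-0]  (rbp), C line 2489
  u_walk hcode [hμ.vendor] until [Vorbis.L.imdct_step3_inner_r_loop.ret2] span [Vorbis.L.textLo, Vorbis.L.textHi] side (v_side)
  case check_10577e =>
    have hun : ShadowUntouched ue.mem s_10577e.mem := by v_untouched
    exact hlive.accSmall hsh.inv hun _ 4 (by decide) (by u_omega) (by u_omega)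
  try clear w_zmm
  -- to the return of check 3 at 0x1057a2: e0[-1]  (r12 - 4), C line 2490
  u_walk hcode [hμ.vendor] until [Vorbis.L.imdct_step3_inner_r_loop.ret3] span [Vorbis.L.textLo, Vorbis.L.textHi] side (v_side)
  case check_1057a2 =>
    have hun : ShadowUntouched ue.mem s_1057a2.mem := by v_untouched
    exact hlive.accSmall hsh.inv hun _ 4 (by decide) (by u_omega) (by u_omega)
  try clear w_zmm
  -- to the return of check 4 at 0x1057b0: e2[-1]  (rbp - 4), C line 2490
  u_walk hcode [hμ.vendor] until [Vorbis.L.imdct_step3_inner_r_loop.ret4] span [Vorbis.L.textLo, Vorbis.L.textHi] side (v_side)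
  case check_1057b0 =>
    have hun : ShadowUntouched ue.mem s_1057b0.mem := by v_untouched
    exact hlive.accSmall hsh.inv hun _ 4 (by decide) (by u_omega) (by u_omega)
  try clear w_zmm
  -- to the return of check 5 at 0x1057ea: A[0]  (rbx), C line 2493
  u_walk hcode [hμ.vendor] until [Vorbis.L.imdct_step3_inner_r_loop.ret5] span [Vorbis.L.textLo, Vorbis.L.textHi] side (v_side)
  case check_1057ea =>
    have hun : ShadowUntouched ue.mem s_1057ea.mem := by v_untouched
    exact hAl.accSmall hsh.inv hun _ 4 (by decide) (by u_omega) (by u_omega)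
  try clear w_zmm
  -- to the return of check 6 at 0x105802: A[1]  (rbx + 4), C line 2493
  u_walk hcode [hμ.vendor] until [Vorbis.L.imdct_step3_inner_r_loop.ret6] span [Vorbis.L.textLo, Vorbis.L.textHi] side (v_side)
  case check_105802 =>
    have hun : ShadowUntouched ue.mem s_105802.mem := by v_untouched
    exact hAl.accSmall hsh.inv hun _ 4 (by decide) (by u_omega) (by u_omega)
  try clear w_zmm
  -- to the return of check 7 at 0x10584f: e0[-2]  (r12 - 8), after the first `A += k1`, C line 2498
  u_walk hcode [hμ.vendor] until [Vorbis.L.imdct_step3_inner_r_loop.ret7] span [Vorbis.L.textLo, Vorbis.L.textHi] side (v_side)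
  case check_10584f =>
    have hun : ShadowUntouched ue.mem s_10584f.mem := by v_untouched
    exact hlive.accSmall hsh.inv hun _ 4 (by decide) (by u_omega) (by u_omega)
  try clear w_zmm
  -- r13 = `movsxd` of the spilled k1, `shl 2`: the byte stride 4 k1, from here on the atom `K4`
  generalize hK : Word.ofBV (BitVec.signExtend 64 (BitVec.ofNat 32 k1)) <<< 2 = K4 at *
  have hK4 : K4.toNat = 4 * k1 := by
    rw [← hK]
    exact Vorbis.Spec.imdct_step3_inner_r_loop_2.sext_shl2 k1 hk31
  -- to the return of check 8 at 0x105865: e2[-2]  (rbp - 8), C line 2498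
  u_walk hcode [hμ.vendor] until [Vorbis.L.imdct_step3_inner_r_loop.ret8] span [Vorbis.L.textLo, Vorbis.L.textHi] side (v_side)
  case check_105865 =>
    have hun : ShadowUntouched ue.mem s_105865.mem := by v_untouched
    exact hlive.accSmall hsh.inv hun _ 4 (by decide) (by u_omega) (by u_omega)
  try clear w_zmm
  -- to the return of check 9 at 0x10588a: e0[-3]  (r12 - 12), C line 2499
  u_walk hcode [hμ.vendor] until [Vorbis.L.imdct_step3_inner_r_loop.ret9] span [Vorbis.L.textLo, Vorbis.L.textHi] side (v_side)
  case check_10588a =>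
    have hun : ShadowUntouched ue.mem s_10588a.mem := by v_untouched
    exact hlive.accSmall hsh.inv hun _ 4 (by decide) (by u_omega) (by u_omega)
  try clear w_zmm
  -- to the return of check 10 at 0x105898: e2[-3]  (rbp - 12), C line 2499
  u_walk hcode [hμ.vendor] until [Vorbis.L.imdct_step3_inner_r_loop.ret10] span [Vorbis.L.textLo, Vorbis.L.textHi] side (v_side)
  case check_105898 =>
    have hun : ShadowUntouched ue.mem s_105898.mem := by v_untouched
    exact hlive.accSmall hsh.inv hun _ 4 (by decide) (by u_omega) (by u_omega)
  try clear w_zmm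
  -- to the return of check 11 at 0x1058d4: A[k1]  (rbx + 4 k1), C line 2502
  u_walk hcode [hμ.vendor] until [Vorbis.L.imdct_step3_inner_r_loop.ret11] span [Vorbis.L.textLo, Vorbis.L.textHi] side (v_side)
  case check_1058d4 =>
    have hun : ShadowUntouched ue.mem s_1058d4.mem := by v_untouched
    exact hAl.accSmall hsh.inv hun _ 4 (by decide) (by u_omega) (by u_omega)
  try clear w_zmm
  -- to the return of check 12 at 0x1058ec: A[k1 + 1]  (rbx + 4 k1 + 4), C line 2502
  u_walk hcode [hμ.vendor] until [Vorbis.L.imdct_step3_inner_r_loop.ret12] span [Vorbis.L.textLo, Vorbis.L.textHi] side (v_side)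
  case check_1058ec =>
    have hun : ShadowUntouched ue.mem s_1058ec.mem := by v_untouched
    exact hAl.accSmall hsh.inv hun _ 4 (by decide) (by u_omega) (by u_omega)
  try clear w_zmm
  u_walk hcode [hμ.vendor] until [Vorbis.L.imdct_step3_inner_r_loop.cut2] span [Vorbis.L.textLo, Vorbis.L.textHi] side (v_side)
  -- cut2 (0x10592b): the exit assertion `AtMid`, from the lemma `exit_assertion`
  have hdf' : s_105928.flags .df = false := by
    rw [w_flags]
    simp only [X86.User.df_setStatus]
    exact w_df_1058ec
  have hmx' : s_105928.mxcsr &&& 0x1F80 = 0x1F80 := by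
    rw [w_mxcsr]
    exact hmx_10591f
  exact ReachVia.done (Vorbis.Spec.imdct_step3_inner_r_loop_2.exit_assertion hLay hv0 hK4 w_rip w_rbx w_r13 w_rsp w_kept
    w_mem w_eq hdf' hmx')
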